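/- GENERATED by tools/from_farm_form.py from prooffarm-gif/accepted/DGifSlurp.11/Proof.lean (a worked proof of the farm's unit `DGifSlurp.11`,
   accepted by the verdict) — do not edit. -/
import Gif.Spec.Units.DGifSlurp_11
import Gif.Spec.AllSegs
import Gif.Spec.Proved.DGifSlurp_11_Lemmas

open X86 X86.User Asan ProgX.Base ProgX.Base.Spec Gif.Spec

/-!
  `DGifSlurp.11` (0x10a8a2 … 0x10a8ed, 21 instructions; dgif_lib.c:1290-1306): THE HEAD OF THE SUB-BLOCK LOOP of DGifSlurp, a body
  segment of a protected function with two contract calls and one check. The two calls' return addresses (`ret20`, `ret22`) and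
  the check call (`chk14`) are private cuts with private assertions; the four walks are in Lemmas.lean, chained here.
-/

/-- Segment 11 of `DGifSlurp` takes `ExtHead` at 0x10a8a2 to `ExtHead` with a smaller measure, to `Rec` at 0x10a81f, or to an
exit at 0x10a8ed. -/
theorem Gif.Spec.Proved.DGifSlurp_11_ok : Gif.Spec.DGifSlurp_11.Statement := by
  intro Lay hLay μ hμ u₀ hcode h_next h_load1 h_add H rest frames F R Hc Fc m k e ret v hat
  -- the callees' contracts for the present heap and forest and the frame list of the body (the own frame in front)
  have hnext := h_next Hc rest (DGifSlurp.framesIn frames e) Fc R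
  have hadd := h_add Hc rest (DGifSlurp.framesIn frames e) Fc R
  -- 0x10a8a2 … the call of DGifGetExtensionNext … 0x10a8af (l.1291)
  refine (Gif.Spec.DGifSlurp_11.sl11_seg_call1 Lay hLay μ hμ u₀ hcode H rest frames F R Hc Fc m k e ret hnext v hat).trans ?_
  intro v1 hv1
  -- 0x10a8af … 0x10a8ca | 0x10a81f | 0x10a8ed (l.1291-1303)
  refine (Gif.Spec.DGifSlurp_11.sl11_seg_mid Lay hLay μ hμ u₀ hcode H rest frames F R Hc Fc m k e ret v1 hv1).trans ?_
  intro v2 hv2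
  rcases hv2 with hchk | hrec | hexit
  · -- 0x10a8ca … the check, the call of GifAddExtensionBlock … 0x10a8e7 (l.1299-1303)
    refine (Gif.Spec.DGifSlurp_11.sl11_seg_call2 Lay hLay μ hμ u₀ hcode H rest frames F R Hc Fc m k e ret h_load1 hadd v2
      hchk).trans ?_
    intro v3 hv3
    obtain ⟨H', F', hv3'⟩ := hv3
    -- 0x10a8e7 … 0x10a8a2 | 0x10a8ed (l.1299-1304)
    refine (Gif.Spec.DGifSlurp_11.sl11_seg_tail Lay hLay μ hμ u₀ hcode H rest frames F R H' F' m k e ret v3 hv3').mono ?_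
    intro w hw
    rcases hw with hhead | hexit'
    · exact Or.inl hhead
    · exact Or.inr (Or.inr hexit')
  · -- `ExtData = NULL`: the record is done
    exact ReachVia.done (Or.inr (Or.inl hrec))
  · -- GIF_ERROR of DGifGetExtensionNext
    exact ReachVia.done (Or.inr (Or.inr hexit))
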